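-- pv_equiv track=rewrite | github.com/NVIDIA/NeMo | nemo/collections/avlm/data/energon/avlm_task_encoder.py | concate_audio_video_tokens_sequential
-- ===== SOURCE A (Python) =====
-- def concate_audio_video_tokens_sequential(tokenized_chunks_audio, tokenized_chunks_video):
--     """
--     Parameters:
--         tokenized_chunks_video: {stream_index: List[self.image_token.token_id]}
--         tokenized_chunks_audio: {stream_index: List[self.audio_token.token_id]}
--     Returns:
--         List of concatenated tokens according to the stream index in the original video file
--     """
--     indexes = set(list(tokenized_chunks_audio.keys()) + list(tokenized_chunks_video.keys()))
--     tokens = []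
--     for index in sorted(indexes):
--         if index in tokenized_chunks_video:
--             tokens.extend(tokenized_chunks_video[index])
--         # ideally, video and audio stream index should be unique.
--         # if they share identical index, add the video tokens first
--         if index in tokenized_chunks_audio:
--             tokens.extend(tokenized_chunks_audio[index])
--     return tokens
-- ===== SOURCE B (Python) =====
-- def concate_audio_video_tokens_sequential(tokenized_chunks_audio, tokenized_chunks_video):
--     # Merge-join: sort each dict's items by stream index independently, then walk
--     # the two sorted streams with two pointers, emitting the smaller index first
--     # and, on a shared index, the video tokens before the audio tokens.
--     video = sorted(tokenized_chunks_video.items(), key=lambda p: p[0])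
--     audio = sorted(tokenized_chunks_audio.items(), key=lambda p: p[0])
--     tokens = []
--     i = j = 0
--     while i < len(video) and j < len(audio):
--         vi, vt = video[i]
--         aj, at = audio[j]
--         if vi < aj:
--             tokens.extend(vt)
--             i += 1
--         elif aj < vi:
--             tokens.extend(at)
--             j += 1
--         else:
--             tokens.extend(vt)
--             tokens.extend(at)
--             i += 1
--             j += 1
--     while i < len(video):
--         tokens.extend(video[i][1])
--         i += 1
--     while j < len(audio):
--         tokens.extend(audio[j][1])
--         j += 1
--     return tokens
-- ===== Notes on version B (the rewrite author's own statement) =====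
-- stated objective: alternative
-- what changed: B replaces A's key-union/sort/dict-probing (build a set of all indices, sort it, look each index up in both dicts) by a merge-join: each dict's items are sorted independently and two pointers merge the two sorted streams, emitting video tokens first on a shared index; no key set and no dict lookups remain.
import Mathlib
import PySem

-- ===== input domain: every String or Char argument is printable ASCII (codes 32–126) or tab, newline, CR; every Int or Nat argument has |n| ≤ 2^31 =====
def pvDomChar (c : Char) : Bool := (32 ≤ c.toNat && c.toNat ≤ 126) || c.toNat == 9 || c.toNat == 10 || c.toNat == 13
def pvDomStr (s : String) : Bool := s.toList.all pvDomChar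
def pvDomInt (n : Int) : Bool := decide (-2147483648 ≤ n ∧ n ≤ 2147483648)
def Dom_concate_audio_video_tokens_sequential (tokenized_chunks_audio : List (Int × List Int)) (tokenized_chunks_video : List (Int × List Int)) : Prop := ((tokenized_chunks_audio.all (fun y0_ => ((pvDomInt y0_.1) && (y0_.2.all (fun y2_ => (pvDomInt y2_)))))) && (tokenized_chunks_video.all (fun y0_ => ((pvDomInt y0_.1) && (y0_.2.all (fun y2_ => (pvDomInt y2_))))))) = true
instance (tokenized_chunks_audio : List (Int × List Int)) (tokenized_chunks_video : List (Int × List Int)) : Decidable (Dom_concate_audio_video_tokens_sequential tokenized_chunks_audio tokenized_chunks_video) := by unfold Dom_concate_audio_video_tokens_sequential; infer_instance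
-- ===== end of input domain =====

-- B replaces A's key-union/sort/dict-probing by a merge-join of the two
-- independently sorted item lists (video first on a shared index); proved equal.


-- ===== PORT A =====
def concate_audio_video_tokens_sequential (tokenized_chunks_audio : List (Int × List Int)) (tokenized_chunks_video : List (Int × List Int)) : List Int :=
  let da := PySem.Dict.ofList tokenized_chunks_audio
  let dv := PySem.Dict.ofList tokenized_chunks_video
  let indexes : PySem.Set Int := PySem.Set.ofList (da.keys ++ dv.keys)
  (PySem.List.sorted indexes (fun x => x)).foldl
    (fun tokens index =>
      let tokens := if dv.contains index then tokens ++ dv.getD index [] else tokens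
      if da.contains index then tokens ++ da.getD index [] else tokens)
    []

-- ===== PORT B =====
-- the two-pointer while loop of Source B as a two-list recursion over the same state
def pvMerge : List (Int × List Int) → List (Int × List Int) → List Int
  | [], ys => ys.flatMap (fun p => p.2)
  | x :: xs, [] => (x :: xs).flatMap (fun p => p.2)
  | (vi, vt) :: xs, (aj, at_) :: ys =>
    if vi < aj then vt ++ pvMerge xs ((aj, at_) :: ys)
    else if aj < vi then at_ ++ pvMerge ((vi, vt) :: xs) ys
    else vt ++ at_ ++ pvMerge xs ys
termination_by xs ys => xs.length + ys.length

def concate_audio_video_tokens_sequential_alt (tokenized_chunks_audio : List (Int × List Int)) (tokenized_chunks_video : List (Int × List Int)) : List Int :=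
  let video := PySem.List.sorted (PySem.Dict.ofList tokenized_chunks_video).items (fun p => p.1)
  let audio := PySem.List.sorted (PySem.Dict.ofList tokenized_chunks_audio).items (fun p => p.1)
  pvMerge video audio

-- ===== PRECONDITION & SPEC =====
def Spec_concate_audio_video_tokens_sequential (tokenized_chunks_audio : List (Int × List Int)) (tokenized_chunks_video : List (Int × List Int)) (out : List Int) : Prop := out = concate_audio_video_tokens_sequential_alt tokenized_chunks_audio tokenized_chunks_video
instance (tokenized_chunks_audio : List (Int × List Int)) (tokenized_chunks_video : List (Int × List Int)) (out : List Int) : Decidable (Spec_concate_audio_video_tokens_sequential tokenized_chunks_audio tokenized_chunks_video out) := by unfold Spec_concate_audio_video_tokens_sequential; infer_instance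

-- ===== CLAIM (what is proved, stated in full; the proofs are below) =====
def Claim_equal_concate_audio_video_tokens_sequential : Prop := ∀ (tokenized_chunks_audio : List (Int × List Int)) (tokenized_chunks_video : List (Int × List Int)), Dom_concate_audio_video_tokens_sequential tokenized_chunks_audio tokenized_chunks_video → Spec_concate_audio_video_tokens_sequential tokenized_chunks_audio tokenized_chunks_video (concate_audio_video_tokens_sequential tokenized_chunks_audio tokenized_chunks_video)

-- ===== LEMMAS AND PROOFS =====

-- one chunk of the tagged combined list for key i of dict d, stream order c
def pvPart (d : PySem.Dict Int (List Int)) (c : Int) (i : Int) : List (Int × Int × List Int) :=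
  ((d.get? i).map (fun t => (i, c, t))).toList

-- B's merge, keeping each emitted chunk tagged with (index, stream order)
def pvMergeT : List (Int × List Int) → List (Int × List Int) → List (Int × Int × List Int)
  | [], ys => ys.map (fun p => (p.1, (1 : Int), p.2))
  | x :: xs, [] => (x :: xs).map (fun p => (p.1, (0 : Int), p.2))
  | (vi, vt) :: xs, (aj, at_) :: ys =>
    if vi < aj then (vi, 0, vt) :: pvMergeT xs ((aj, at_) :: ys)
    else if aj < vi then (aj, 1, at_) :: pvMergeT ((vi, vt) :: xs) ys
    else (vi, 0, vt) :: (aj, 1, at_) :: pvMergeT xs ys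
termination_by xs ys => xs.length + ys.length

-- A's loop as a flatMap
theorem pv_foldl_A (p1 p2 : Int → Bool) (f1 f2 : Int → List Int) (l : List Int) (acc : List Int) :
    l.foldl (fun tokens i =>
        let tokens := if p1 i then tokens ++ f1 i else tokens
        if p2 i then tokens ++ f2 i else tokens) acc
      = acc ++ l.flatMap (fun i => (if p1 i then f1 i else []) ++ (if p2 i then f2 i else [])) := by
  induction l generalizing acc with
  | nil => simp
  | cons a l ih => simp only [List.foldl_cons, List.flatMap_cons, ih]; split_ifs <;> simp

-- flattening one key's chunks gives A's per-key contribution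
theorem pv_flat_part (d : PySem.Dict Int (List Int)) (c i : Int) :
    (pvPart d c i).flatMap (fun x => x.2.2) = if d.contains i then d.getD i [] else [] := by
  rw [PySem.Dict.contains_eq_isSome_get?]
  cases h : d.get? i <;> simp [pvPart, PySem.Dict.getD, h]

-- first two components of a chunk produced for key i
theorem pv_mem_part (d : PySem.Dict Int (List Int)) (c i : Int) (x : Int × Int × List Int)
    (hx : x ∈ pvPart d c i) : x.1 = i ∧ x.2.1 = c := by
  cases h : d.get? i <;> simp [pvPart, h] at hx
  subst hx; exact ⟨rfl, rfl⟩

-- a flatMap of per-element appends splits into two flatMaps, up to permutation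
theorem pv_flatMap_append_perm {α β : Type} (f g : α → List β) (l : List α) :
    (l.flatMap (fun i => f i ++ g i)).Perm (l.flatMap f ++ l.flatMap g) := by
  induction l with
  | nil => simp
  | cons a l ih =>
    simp only [List.flatMap_cons]
    refine (ih.append_left (f a ++ g a)).trans ?_
    simp only [List.append_assoc]
    exact (List.perm_append_comm_assoc (g a) (l.flatMap f) (l.flatMap g)).append_left (f a)

-- collecting pvPart over a key list keeps exactly the keys the dict contains
theorem pv_flatMap_part_eq (d : PySem.Dict Int (List Int)) (c : Int) (K : List Int) :
    K.flatMap (pvPart d c)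
      = (K.filter (fun i => d.contains i)).map (fun i => (i, c, d.getD i [])) := by
  induction K with
  | nil => simp
  | cons a K ih =>
    rw [List.flatMap_cons, List.filter_cons, ih]
    by_cases h : d.contains a
    · have hs : (d.get? a).isSome := by rw [← PySem.Dict.contains_eq_isSome_get?]; exact h
      rcases Option.isSome_iff_exists.mp hs with ⟨t, ht⟩
      simp [pvPart, ht, h, PySem.Dict.getD]
    · have hn : d.get? a = none := by
        have hc := PySem.Dict.contains_eq_isSome_get? d a
        cases hg : d.get? a
        · rfl
        · rw [hg] at hc; simp [hc] at h
      simp [pvPart, hn, h]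

-- collecting pvPart over any nodup key superset is a permutation of the tagged items
theorem pv_perm_part (d : PySem.Dict Int (List Int)) (c : Int) (K : List Int)
    (hd : d.keys.Nodup) (hK : K.Nodup) (hsub : ∀ k ∈ d.keys, k ∈ K) :
    (K.flatMap (pvPart d c)).Perm (d.items.map (fun p => (p.1, c, p.2))) := by
  rw [pv_flatMap_part_eq]
  have hperm : (K.filter (fun i => d.contains i)).Perm d.keys := by
    rw [List.perm_ext_iff_of_nodup (hK.filter _) hd]
    intro a
    simp only [List.mem_filter]
    constructor
    · rintro ⟨-, hc⟩; exact (PySem.Dict.contains_iff_mem_keys d a).mp hc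
    · intro ha; exact ⟨hsub a ha, (PySem.Dict.contains_iff_mem_keys d a).mpr ha⟩
  refine (hperm.map _).trans ?_
  have hkeys : d.keys.map (fun i => (i, c, d.getD i [])) = d.items.map (fun p => (p.1, c, p.2)) := by
    show (d.items.map (fun p => p.1)).map (fun i => (i, c, d.getD i [])) = _
    rw [List.map_map]
    refine List.map_congr_left (fun p hp => ?_)
    have : d.getD p.1 [] = p.2 :=
      PySem.Dict.getD_of_mem_items d (by rw [Prod.mk.eta]; exact hp) hd []
    simp [this]
  exact hkeys ▸ List.Perm.refl _

-- chunks from a strictly increasing key list are lexicographically pairwise increasing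
theorem pv_pairwise_flatMap (dv da : PySem.Dict Int (List Int)) (K : List Int)
    (hp : K.Pairwise (· < ·)) :
    (K.flatMap (fun i => pvPart dv 0 i ++ pvPart da 1 i)).Pairwise
      (fun x y => toLex (x.1, x.2.1) < toLex (y.1, y.2.1)) := by
  induction K with
  | nil => simp
  | cons a K ih =>
    rcases List.pairwise_cons.mp hp with ⟨ha, hp'⟩
    rw [List.flatMap_cons, List.pairwise_append]
    refine ⟨?_, ih hp', ?_⟩
    · cases hv : dv.get? a <;> cases hda : da.get? a <;>
        simp [pvPart, hv, hda, Prod.Lex.lt_iff]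
    · intro x hx y hy
      rcases List.mem_append.mp hx with h | h <;>
        rcases pv_mem_part _ _ _ _ h with ⟨hx1, -⟩ <;>
      · rcases List.mem_flatMap.mp hy with ⟨j, hj, hyj⟩
        rcases List.mem_append.mp hyj with h' | h' <;>
          rcases pv_mem_part _ _ _ _ h' with ⟨hy1, -⟩ <;>
        · rw [Prod.Lex.lt_iff]; left; rw [hx1, hy1]; exact ha j hj

-- the tagged merge is a permutation of the two tagged input lists appended
theorem pv_mergeT_perm (xs ys : List (Int × List Int)) :
    (pvMergeT xs ys).Perm
      (xs.map (fun p => (p.1, (0 : Int), p.2)) ++ ys.map (fun p => (p.1, (1 : Int), p.2))) := by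
  induction xs, ys using pvMergeT.induct with
  | case1 ys => simp [pvMergeT]
  | case2 x xs => simp [pvMergeT]
  | case3 vi vt xs aj at_ ys h ih =>
    rw [pvMergeT]; simp only [h, if_true, List.map_cons, List.cons_append]
    exact ih.cons _
  | case4 vi vt xs aj at_ ys h1 h2 ih =>
    rw [pvMergeT]; simp only [h1, if_false, h2, if_true, List.map_cons]
    refine (ih.cons _).trans ?_
    simp only [List.map_cons, List.cons_append]
    have h := (@List.perm_middle _ (aj, (1 : Int), at_)
      ((vi, (0 : Int), vt) :: xs.map (fun p => (p.1, (0 : Int), p.2)))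
      (ys.map (fun p => (p.1, (1 : Int), p.2)))).symm
    simpa using h
  | case5 vi vt xs aj at_ ys h1 h2 ih =>
    rw [pvMergeT]; simp only [h1, if_false, h2, List.map_cons, List.cons_append]
    refine ((ih.cons (aj, 1, at_)).cons (vi, 0, vt)).trans ?_
    exact List.Perm.cons _ List.perm_middle.symm

-- keys occurring in the tagged merge come from one of the two inputs
theorem pv_mergeT_mem_key (xs ys : List (Int × List Int)) (x : Int × Int × List Int)
    (hx : x ∈ pvMergeT xs ys) : (∃ p ∈ xs, x.1 = p.1) ∨ (∃ p ∈ ys, x.1 = p.1) := by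
  have := (pv_mergeT_perm xs ys).mem_iff.mp hx
  rcases List.mem_append.mp this with h | h <;>
    rcases List.mem_map.mp h with ⟨p, hp, hpe⟩
  · exact Or.inl ⟨p, hp, by rw [← hpe]⟩
  · exact Or.inr ⟨p, hp, by rw [← hpe]⟩

-- merging two strictly key-increasing lists gives a lexicographically increasing chunk list
theorem pv_mergeT_pairwise (xs ys : List (Int × List Int))
    (hx : xs.Pairwise (fun a b => a.1 < b.1)) (hy : ys.Pairwise (fun a b => a.1 < b.1)) :
    (pvMergeT xs ys).Pairwise (fun x y => toLex (x.1, x.2.1) < toLex (y.1, y.2.1)) := by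
  induction xs, ys using pvMergeT.induct with
  | case1 ys =>
    simp only [pvMergeT, List.pairwise_map]
    exact hy.imp (fun h => by rw [Prod.Lex.lt_iff]; exact Or.inl h)
  | case2 x xs =>
    simp only [pvMergeT, List.pairwise_map]
    exact hx.imp (fun h => by rw [Prod.Lex.lt_iff]; exact Or.inl h)
  | case3 vi vt xs aj at_ ys h ih =>
    rcases List.pairwise_cons.mp hx with ⟨hxa, hx'⟩
    rw [pvMergeT]; simp only [h, if_true]
    refine List.pairwise_cons.mpr ⟨?_, ih hx' hy⟩
    intro y hym
    rw [Prod.Lex.lt_iff]; left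
    rcases pv_mergeT_mem_key _ _ _ hym with ⟨p, hp, he⟩ | ⟨p, hp, he⟩
    · rw [he]; exact hxa p hp
    · rcases List.mem_cons.mp hp with rfl | hp'
      · rw [he]; exact h
      · rw [he]; exact h.trans ((List.pairwise_cons.mp hy).1 p hp')
  | case4 vi vt xs aj at_ ys h1 h2 ih =>
    rcases List.pairwise_cons.mp hy with ⟨hya, hy'⟩
    rw [pvMergeT]; simp only [h1, if_false, h2, if_true]
    refine List.pairwise_cons.mpr ⟨?_, ih hx hy'⟩
    intro y hym
    rw [Prod.Lex.lt_iff]; left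
    rcases pv_mergeT_mem_key _ _ _ hym with ⟨p, hp, he⟩ | ⟨p, hp, he⟩
    · rcases List.mem_cons.mp hp with rfl | hp'
      · rw [he]; exact h2
      · rw [he]; exact h2.trans ((List.pairwise_cons.mp hx).1 p hp')
    · rw [he]; exact hya p hp
  | case5 vi vt xs aj at_ ys h1 h2 ih =>
    have heq : vi = aj := le_antisymm (not_lt.mp h2) (not_lt.mp h1)
    rcases List.pairwise_cons.mp hx with ⟨hxa, hx'⟩
    rcases List.pairwise_cons.mp hy with ⟨hya, hy'⟩
    rw [pvMergeT]; simp only [h1, if_false, h2]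
    have htail : ∀ y ∈ pvMergeT xs ys, vi < y.1 := by
      intro y hym
      rcases pv_mergeT_mem_key _ _ _ hym with ⟨p, hp, he⟩ | ⟨p, hp, he⟩
      · rw [he]; exact hxa p hp
      · rw [he]; exact heq ▸ hya p hp
    refine List.pairwise_cons.mpr ⟨?_, List.pairwise_cons.mpr ⟨?_, ih hx' hy'⟩⟩
    · intro y hym
      rcases List.mem_cons.mp hym with rfl | hym'
      · rw [Prod.Lex.lt_iff]; right; exact ⟨heq, by norm_num⟩
      · rw [Prod.Lex.lt_iff]; exact Or.inl (htail y hym')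
    · intro y hym
      rw [Prod.Lex.lt_iff]; left; rw [← heq]; exact htail y hym

-- B's token merge flattens the tagged merge
theorem pv_merge_eq_flat (xs ys : List (Int × List Int)) :
    pvMerge xs ys = (pvMergeT xs ys).flatMap (fun x => x.2.2) := by
  induction xs, ys using pvMergeT.induct with
  | case1 ys => simp [pvMerge, pvMergeT, List.flatMap_map]
  | case2 x xs => simp [pvMerge, pvMergeT, List.flatMap_map]
  | case3 vi vt xs aj at_ ys h ih => rw [pvMerge, pvMergeT]; simp [h, ih]
  | case4 vi vt xs aj at_ ys h1 h2 ih => rw [pvMerge, pvMergeT]; simp [h1, h2, ih]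
  | case5 vi vt xs aj at_ ys h1 h2 ih => rw [pvMerge, pvMergeT]; simp [h1, h2, ih]

-- a key-sorted item list of a dict has strictly increasing keys
theorem pv_sorted_items_strict (l : List (Int × List Int)) :
    (PySem.List.sorted (PySem.Dict.ofList l).items (fun p => p.1)).Pairwise
      (fun a b => a.1 < b.1) := by
  have hle := PySem.List.sorted_pairwise (PySem.Dict.ofList l).items (fun p => p.1)
  have hperm := (PySem.List.sorted_perm (PySem.Dict.ofList l).items (fun p => p.1) false).map
    (fun p : Int × List Int => p.1)
  have hnd := hperm.symm.nodup (PySem.Dict.nodup_keys_ofList l)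
  rw [List.nodup_iff_pairwise_ne, List.pairwise_map] at hnd
  exact (hle.and hnd).imp (fun h => lt_of_le_of_ne h.1 h.2)

-- the tagged merge of B equals the per-key chunk list A's traversal produces
theorem pv_mergeT_eq_flatMap (ta tv : List (Int × List Int)) :
    pvMergeT (PySem.List.sorted (PySem.Dict.ofList tv).items (fun p => p.1))
             (PySem.List.sorted (PySem.Dict.ofList ta).items (fun p => p.1))
      = (PySem.List.sorted (PySem.Set.ofList ((PySem.Dict.ofList ta).keys ++ (PySem.Dict.ofList tv).keys)) (fun x => x)).flatMap
          (fun i => pvPart (PySem.Dict.ofList tv) 0 i ++ pvPart (PySem.Dict.ofList ta) 1 i) := by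
  set da := PySem.Dict.ofList ta
  set dv := PySem.Dict.ofList tv
  set K := PySem.List.sorted (PySem.Set.ofList (da.keys ++ dv.keys)) (fun x => x) with hKdef
  set video := PySem.List.sorted dv.items (fun p => p.1) with hvdef
  set audio := PySem.List.sorted da.items (fun p => p.1) with hadef
  have hKnodup : K.Nodup :=
    (PySem.List.sorted_perm _ _ _).symm.nodup (PySem.Set.nodup_ofList _)
  have hKmem : ∀ i : Int, i ∈ K ↔ i ∈ da.keys ∨ i ∈ dv.keys := by
    intro i
    rw [hKdef, PySem.List.mem_sorted, PySem.Set.mem_ofList, List.mem_append]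
  set combined := dv.items.map (fun p => (p.1, (0 : Int), p.2))
      ++ da.items.map (fun p => (p.1, (1 : Int), p.2)) with hcdef
  have h1 : PySem.List.sorted combined (fun c => toLex (c.1, c.2.1)) = pvMergeT video audio := by
    apply PySem.List.sorted_eq_of_perm_of_pairwise_lt
    · refine (pv_mergeT_perm video audio).trans (List.Perm.append ?_ ?_)
      · exact (PySem.List.sorted_perm _ _ _).map _
      · exact (PySem.List.sorted_perm _ _ _).map _
    · exact pv_mergeT_pairwise video audio
        (hvdef ▸ pv_sorted_items_strict tv) (hadef ▸ pv_sorted_items_strict ta)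
  have h2 : PySem.List.sorted combined (fun c => toLex (c.1, c.2.1))
      = K.flatMap (fun i => pvPart dv 0 i ++ pvPart da 1 i) := by
    apply PySem.List.sorted_eq_of_perm_of_pairwise_lt
    · refine (pv_flatMap_append_perm _ _ K).trans (List.Perm.append ?_ ?_)
      · exact pv_perm_part dv 0 K (PySem.Dict.nodup_keys_ofList tv) hKnodup
          (fun k hk => (hKmem k).mpr (Or.inr hk))
      · exact pv_perm_part da 1 K (PySem.Dict.nodup_keys_ofList ta) hKnodup
          (fun k hk => (hKmem k).mpr (Or.inl hk))
    · exact pv_pairwise_flatMap dv da K (hKdef ▸ PySem.List.sorted_ofList_pairwise_lt _)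
  rw [← h1, h2]

-- ===== VERDICT (by name: the statement is the Claim_ definition above) =====
theorem concate_audio_video_tokens_sequential_spec : Claim_equal_concate_audio_video_tokens_sequential := by
  intro ta tv _
  unfold Spec_concate_audio_video_tokens_sequential
  simp only [concate_audio_video_tokens_sequential, concate_audio_video_tokens_sequential_alt]
  rw [pv_foldl_A, pv_merge_eq_flat, pv_mergeT_eq_flatMap, List.flatMap_assoc]
  simp only [List.nil_append, List.flatMap_append, pv_flat_part]
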